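-- pv_equiv track=rewrite | github.com/onesource-consulting/amplify-automations | src/amplify_automations/core/tutorial_catalog.py | _simplify_tool_name
-- ===== SOURCE A (Python) =====
-- from typing import Iterable, List, Sequence, Tuple
--
-- _TRAILING_DESCRIPTOR_KEYWORDS: Tuple[str, ...] = (
--     "mock",
--     "sandbox",
--     "integration",
--     "automation",
--     "workflow",
--     "templating",
-- )
--
-- def _simplify_tool_name(tool: str) -> str:
--     """Return ``tool`` without trailing descriptive phrases.
--
--     Tutorials sometimes describe tools with phrases such as
--     ``"Deltek Vantagepoint mock API integration"``.  The catalogue should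
--     capture only the underlying software names so that downstream consumers can
--     group tutorials by the same tool regardless of how the author phrased the
--     description.  This helper trims the trailing descriptor when it starts with
--     one of the keywords in :data:`_TRAILING_DESCRIPTOR_KEYWORDS`.
--     """
--
--     if not isinstance(tool, str):
--         return ""
--
--     name = " ".join(tool.split()).strip()
--     if not name:
--         return ""
--
--     lower_name = name.casefold()
--     for keyword in _TRAILING_DESCRIPTOR_KEYWORDS:
--         marker = f" {keyword}"
--         idx = lower_name.find(marker)
--         if idx != -1:
--             name = name[:idx]
--             lower_name = lower_name[:idx]
--
--     simplified = name.strip()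
--     return simplified or ""
-- ===== SOURCE B (Python) =====
-- _TRAILING_DESCRIPTOR_KEYWORDS = (
--     "mock",
--     "sandbox",
--     "integration",
--     "automation",
--     "workflow",
--     "templating",
-- )
--
-- def _simplify_tool_name(tool):
--     """Single left-to-right scan: cut at the first space whose tail starts
--     with any descriptor keyword, instead of repeated find-and-truncate."""
--     if not isinstance(tool, str):
--         return ""
--     name = " ".join(tool.split())
--     if not name:
--         return ""
--     lower_name = name.casefold()
--     for i, ch in enumerate(lower_name):
--         if ch == " " and lower_name[i + 1:].startswith(_TRAILING_DESCRIPTOR_KEYWORDS):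
--             return name[:i]
--     return name
-- ===== Notes on version B (the rewrite author's own statement) =====
-- stated objective: alternative
-- what changed: A loops over the six keywords, repeatedly calling find on a space-prefixed keyword and truncating name and lower_name; B makes a single left-to-right scan over the normalized string and cuts at the first space whose tail starts with any of the keywords.
import Mathlib
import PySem

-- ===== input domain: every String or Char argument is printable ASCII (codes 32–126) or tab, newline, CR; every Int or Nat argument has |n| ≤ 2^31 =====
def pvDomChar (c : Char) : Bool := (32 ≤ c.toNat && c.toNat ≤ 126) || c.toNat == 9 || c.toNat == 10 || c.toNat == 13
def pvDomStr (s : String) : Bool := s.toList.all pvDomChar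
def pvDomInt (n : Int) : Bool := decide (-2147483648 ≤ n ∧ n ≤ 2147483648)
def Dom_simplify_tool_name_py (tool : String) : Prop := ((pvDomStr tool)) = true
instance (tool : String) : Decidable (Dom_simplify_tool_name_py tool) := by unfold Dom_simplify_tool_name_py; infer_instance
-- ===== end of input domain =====

-- B replaces A's per-keyword find-and-truncate loop by one left-to-right scan that cuts at the
-- first space whose tail starts with any descriptor keyword (same values; objective: alternative).


-- ===== PORT A =====

-- _TRAILING_DESCRIPTOR_KEYWORDS, as lists of characters
def pvKeywords : List (List Char) :=
  [['m','o','c','k'],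
   ['s','a','n','d','b','o','x'],
   ['i','n','t','e','g','r','a','t','i','o','n'],
   ['a','u','t','o','m','a','t','i','o','n'],
   ['w','o','r','k','f','l','o','w'],
   ['t','e','m','p','l','a','t','i','n','g']]

-- one iteration of A's `for keyword in _TRAILING_DESCRIPTOR_KEYWORDS` loop over the state
-- (name, lower_name): idx = lower_name.find(" " + keyword); if idx != -1, slice both to [:idx]
def pvAStep (st : List Char × List Char) (kw : List Char) : List Char × List Char :=
  let idx := PySem.Chars.find st.2 (' ' :: kw)
  if idx ≠ -1 then
    (PySem.List.slice st.1 none (some idx), PySem.List.slice st.2 none (some idx))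
  else st

-- port of A; `isinstance(tool, str)` always holds under the type convention, and `casefold()`
-- is ported as `lower` (exact on the ASCII domain); the final `simplified or ""` is `simplified`
-- in both branches, since `"" or ""` is `""`
def simplify_tool_name_py (tool : String) : String :=
  let name := PySem.Str.strip (PySem.Str.join " " (PySem.Str.split₀ tool))
  if name = "" then ""
  else
    let st := pvKeywords.foldl pvAStep (name.toList, PySem.Chars.lower name.toList)
    String.ofList (PySem.Chars.strip st.1)

-- ===== PORT B =====

-- B's `for i, ch in enumerate(lower_name)` scan: first index i with lower_name[i] == ' '
-- whose tail lower_name[i+1:] starts with one of the keywords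
def pvScan : List Char → Nat → Option Nat
  | [], _ => none
  | c :: rest, i =>
    if c == ' ' && pvKeywords.any (fun kw => PySem.Chars.startswith rest kw) then some i
    else pvScan rest (i + 1)

-- port of B (casefold() ported as lower, exact on the ASCII domain; name[:i] with i ≥ 0 is take i)
def simplify_tool_name_py_alt (tool : String) : String :=
  let name := PySem.Str.join " " (PySem.Str.split₀ tool)
  if name = "" then ""
  else
    match pvScan (PySem.Chars.lower name.toList) 0 with
    | some i => String.ofList (name.toList.take i)
    | none => name

-- ===== PRECONDITION & SPEC =====
def Spec_simplify_tool_name_py (tool : String) (out : String) : Prop := out = simplify_tool_name_py_alt tool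
instance (tool : String) (out : String) : Decidable (Spec_simplify_tool_name_py tool out) := by unfold Spec_simplify_tool_name_py; infer_instance

-- ===== CLAIM (what is proved, stated in full; the proofs are below) =====
def Claim_equal_simplify_tool_name_py : Prop := ∀ (tool : String), Dom_simplify_tool_name_py tool → Spec_simplify_tool_name_py tool (simplify_tool_name_py tool)

-- ===== LEMMAS AND PROOFS =====

-- words are nonempty and whitespace-free
def pvGoodW (ws : List (List Char)) : Prop :=
  ∀ w ∈ ws, w ≠ [] ∧ ∀ c ∈ w, PySem.Chars.isspace c = false

-- " keyword" occurs in ls at position i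
def pvOcc (ls kw : List Char) (i : Nat) : Prop := (' ' :: kw) <+: ls.drop i

-- invariant for A's truncation length: full length, or a cut at a space
def pvGoodL (ls : List Char) (L : Nat) : Prop := L = ls.length ∨ ls[L]? = some ' '

-- the length evolution of A's loop, phrased over the untruncated lower string
def pvLF (ls : List Char) : List (List Char) → Nat → Nat
  | [], L => L
  | kw :: K, L =>
    pvLF ls K
      (if 0 ≤ PySem.Chars.find ls (' ' :: kw) ∧ PySem.Chars.find ls (' ' :: kw) < (L : Int)
       then (PySem.Chars.find ls (' ' :: kw)).toNat else L)

-- B's match condition at position i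
def pvM (ls : List Char) (i : Nat) : Prop :=
  ls[i]? = some ' ' ∧ ∃ kw ∈ pvKeywords, kw <+: ls.drop (i + 1)

lemma pv_prefix_getElem (p l : List Char) (i : Nat) (h : p <+: l) (hi : i < p.length) :
    l[i]? = some p[i] := by
  obtain ⟨t, rfl⟩ := h
  rw [List.getElem?_append_left hi, List.getElem?_eq_getElem hi]

lemma pv_find_eq_of (s sub : List Char) (j : Nat) (hocc : sub <+: s.drop j)
    (hmin : ∀ i < j, ¬ sub <+: s.drop i) : PySem.Chars.find s sub = (j : Int) := by
  have hinf : sub <:+: s := (PySem.Chars.isIn_iff_infix sub s).1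
    ((PySem.Chars.exists_prefix_drop_iff_isIn sub s).1 ⟨j, hocc⟩)
  have h0 : 0 ≤ PySem.Chars.find s sub := (PySem.Chars.find_nonneg_iff s sub).2 hinf
  obtain ⟨h1, h2⟩ := PySem.Chars.find_spec h0
  have ht : (PySem.Chars.find s sub).toNat = j := by
    rcases lt_trichotomy (PySem.Chars.find s sub).toNat j with h|h|h
    · exact absurd h1 (hmin _ h)
    · exact h
    · exact absurd hocc (h2 _ h)
  omega

lemma pv_occ_take_iff (ls m : List Char) (L j : Nat) (hm : m ≠ []) :
    m <+: (ls.take L).drop j ↔ (m <+: ls.drop j ∧ j + m.length ≤ L) := by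
  have hlen : 1 ≤ m.length := List.length_pos_iff.mpr hm
  rw [List.drop_take, List.prefix_take_iff]
  constructor
  · rintro ⟨h1, h2⟩
    have h3 : j ≤ ls.length := by
      by_contra hc
      rw [List.drop_eq_nil_of_le (by omega)] at h1
      exact hm (List.prefix_nil.1 h1)
    exact ⟨h1, by omega⟩
  · rintro ⟨h1, h2⟩; exact ⟨h1, by omega⟩

lemma pv_fit (ls kw : List Char) (L j : Nat) (hkw : ∀ c ∈ kw, c ≠ ' ')
    (hg : pvGoodL ls L) (hocc : pvOcc ls kw j) (hj : j < L) :
    j + (kw.length + 1) ≤ L := by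
  unfold pvOcc at hocc
  by_contra hcon
  rw [not_le] at hcon
  rcases hg with hL | hsp
  · have := hocc.length_le
    simp only [List.length_drop, List.length_cons] at this
    omega
  · have hk : L - j < (' ' :: kw).length := by simp; omega
    have hget := pv_prefix_getElem _ _ (L - j) hocc hk
    rw [List.getElem?_drop, show j + (L - j) = L from by omega, hsp] at hget
    have h1 : L - j ≠ 0 := by omega
    rw [List.getElem_cons, dif_neg h1] at hget
    exact hkw _ (List.getElem_mem _) (Option.some.inj hget).symm

lemma pv_find_take (ls kw : List Char) (L : Nat) (hkw : ∀ c ∈ kw, c ≠ ' ')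
    (hg : pvGoodL ls L) :
    PySem.Chars.find (ls.take L) (' ' :: kw) =
      if 0 ≤ PySem.Chars.find ls (' ' :: kw) ∧ PySem.Chars.find ls (' ' :: kw) < (L : Int)
      then PySem.Chars.find ls (' ' :: kw) else -1 := by
  set m := ' ' :: kw with hm
  have hmne : m ≠ [] := by simp [hm]
  have hml : m.length = kw.length + 1 := rfl
  split_ifs with h
  · obtain ⟨h0, hFL⟩ := h
    obtain ⟨h1, h2⟩ := PySem.Chars.find_spec h0
    have hFtL : (PySem.Chars.find ls m).toNat < L := by omega
    have hfit : (PySem.Chars.find ls m).toNat + m.length ≤ L := by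
      have := pv_fit ls kw L _ hkw hg h1 hFtL
      omega
    rw [pv_find_eq_of _ _ (PySem.Chars.find ls m).toNat
      ((pv_occ_take_iff ls m L _ hmne).2 ⟨h1, hfit⟩)
      (fun i hi hpre => h2 i hi ((pv_occ_take_iff ls m L i hmne).1 hpre).1)]
    omega
  · rw [PySem.Chars.find_eq_neg_one_iff]
    intro hinf
    obtain ⟨j, hj⟩ := (PySem.Chars.exists_prefix_drop_iff_isIn m (ls.take L)).2
      ((PySem.Chars.isIn_iff_infix _ _).2 hinf)
    obtain ⟨hocc, hfitj⟩ := (pv_occ_take_iff ls m L j hmne).1 hj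
    have hjL : j < L := by omega
    have h0 : 0 ≤ PySem.Chars.find ls m := (PySem.Chars.find_nonneg_iff ls m).2
      ((PySem.Chars.isIn_iff_infix m ls).1
        ((PySem.Chars.exists_prefix_drop_iff_isIn m ls).1 ⟨j, hocc⟩))
    obtain ⟨h1, h2⟩ := PySem.Chars.find_spec h0
    have hle : (PySem.Chars.find ls m).toNat ≤ j := by
      by_contra hc
      exact h2 j (by omega) hocc
    exact h ⟨h0, by omega⟩

lemma pv_loop_eq (ls s : List Char) (K : List (List Char)) (L : Nat)
    (hK : ∀ kw ∈ K, ∀ c ∈ kw, c ≠ ' ') (hg : pvGoodL ls L) :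
    K.foldl pvAStep (s.take L, ls.take L) = (s.take (pvLF ls K L), ls.take (pvLF ls K L))
      ∧ pvGoodL ls (pvLF ls K L) := by
  induction K generalizing L with
  | nil => exact ⟨rfl, hg⟩
  | cons kw K ih =>
    have hkw : ∀ c ∈ kw, c ≠ ' ' := hK kw (List.mem_cons_self)
    have hK' : ∀ k ∈ K, ∀ c ∈ k, c ≠ ' ' := fun k hk => hK k (List.mem_cons_of_mem _ hk)
    simp only [List.foldl_cons]
    have hstep := pv_find_take ls kw L hkw hg
    unfold pvAStep
    simp only []
    rw [hstep]
    by_cases hc : 0 ≤ PySem.Chars.find ls (' ' :: kw) ∧ PySem.Chars.find ls (' ' :: kw) < (L : Int)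
    · rw [if_pos hc]
      have h0 := hc.1
      have hocc : (' ' :: kw) <+: ls.drop (PySem.Chars.find ls (' ' :: kw)).toNat :=
        (PySem.Chars.find_spec h0).1
      have hgood' : pvGoodL ls (PySem.Chars.find ls (' ' :: kw)).toNat := by
        right
        have := pv_prefix_getElem _ _ 0 hocc (by simp)
        rw [List.getElem?_drop] at this
        simpa using this
      rw [if_pos (by omega : PySem.Chars.find ls (' ' :: kw) ≠ -1)]
      rw [PySem.List.slice_to _ h0, PySem.List.slice_to _ h0]
      rw [List.take_take, List.take_take]
      have hmin : min (PySem.Chars.find ls (' ' :: kw)).toNat L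
          = (PySem.Chars.find ls (' ' :: kw)).toNat := by omega
      rw [hmin]
      have := ih (PySem.Chars.find ls (' ' :: kw)).toNat hK' hgood'
      unfold pvLF
      rw [if_pos hc]
      exact this
    · rw [if_neg hc, if_neg (by simp)]
      unfold pvLF
      rw [if_neg hc]
      exact ih L hK' hg

lemma pv_lf_le (ls : List Char) (K : List (List Char)) (L : Nat) : pvLF ls K L ≤ L := by
  induction K generalizing L with
  | nil => exact le_refl L
  | cons kw K ih =>
    unfold pvLF
    split_ifs with h
    · exact le_trans (ih _) (by omega)
    · exact ih L

lemma pv_lf_lower (ls : List Char) (K : List (List Char)) (L : Nat) :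
    ∀ kw ∈ K, ∀ j < pvLF ls K L, ¬ pvOcc ls kw j := by
  induction K generalizing L with
  | nil => simp
  | cons kw0 K ih =>
    intro kw hkw j hj
    unfold pvLF at hj
    rcases List.mem_cons.1 hkw with rfl | hmem
    · intro hocc
      have h0 : 0 ≤ PySem.Chars.find ls (' ' :: kw) := (PySem.Chars.find_nonneg_iff _ _).2
        ((PySem.Chars.isIn_iff_infix _ _).1
          ((PySem.Chars.exists_prefix_drop_iff_isIn _ _).1 ⟨j, hocc⟩))
      obtain ⟨h1, h2⟩ := PySem.Chars.find_spec h0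
      have hminj : (PySem.Chars.find ls (' ' :: kw)).toNat ≤ j := by
        by_contra hcc
        exact h2 j (by omega) hocc
      split_ifs at hj with hc
      · have := pv_lf_le ls K (PySem.Chars.find ls (' ' :: kw)).toNat
        omega
      · have := pv_lf_le ls K L
        rw [not_and_or] at hc
        rcases hc with hc | hc
        · exact hc h0
        · omega
    · split_ifs at hj with hc
      · exact ih _ kw hmem j hj
      · exact ih _ kw hmem j hj

lemma pv_lf_attained (ls : List Char) (K : List (List Char)) (L : Nat)
    (h : pvLF ls K L < L) : ∃ kw ∈ K, pvOcc ls kw (pvLF ls K L) := by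
  induction K generalizing L with
  | nil => exact absurd h (by unfold pvLF; omega)
  | cons kw K ih =>
    unfold pvLF at h ⊢
    split_ifs at h ⊢ with hc
    · by_cases hlt : pvLF ls K (PySem.Chars.find ls (' ' :: kw)).toNat
          < (PySem.Chars.find ls (' ' :: kw)).toNat
      · obtain ⟨kw', hm, ho⟩ := ih _ hlt
        exact ⟨kw', List.mem_cons_of_mem _ hm, ho⟩
      · have heq : pvLF ls K (PySem.Chars.find ls (' ' :: kw)).toNat
            = (PySem.Chars.find ls (' ' :: kw)).toNat :=
          le_antisymm (pv_lf_le _ _ _) (not_lt.1 hlt)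
        refine ⟨kw, List.mem_cons_self, ?_⟩
        rw [heq]
        exact (PySem.Chars.find_spec hc.1).1
    · obtain ⟨kw', hm, ho⟩ := ih _ h
      exact ⟨kw', List.mem_cons_of_mem _ hm, ho⟩

lemma pv_M_iff (ls : List Char) (i : Nat) : pvM ls i ↔ ∃ kw ∈ pvKeywords, pvOcc ls kw i := by
  unfold pvM pvOcc
  constructor
  · rintro ⟨hsp, kw, hkw, hpre⟩
    refine ⟨kw, hkw, ?_⟩
    have hi : i < ls.length := (List.getElem?_eq_some_iff.1 hsp).1
    rw [List.drop_eq_getElem_cons hi, List.cons_prefix_cons]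
    have : ls[i] = ' ' := by
      rw [List.getElem?_eq_getElem hi] at hsp
      exact Option.some.inj hsp
    exact ⟨this.symm, hpre⟩
  · rintro ⟨kw, hkw, hpre⟩
    have hi : i < ls.length := by
      by_contra hc
      rw [List.drop_eq_nil_of_le (by omega)] at hpre
      exact absurd (List.prefix_nil.1 hpre) (by simp)
    rw [List.drop_eq_getElem_cons hi, List.cons_prefix_cons] at hpre
    exact ⟨by rw [List.getElem?_eq_getElem hi, ← hpre.1], kw, hkw, hpre.2⟩

lemma pv_scan_aux (ls : List Char) :
    ∀ t i, ls.drop i = t →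
      (∀ j, pvScan t i = some j → i ≤ j ∧ pvM ls j ∧ ∀ k, i ≤ k → k < j → ¬ pvM ls k)
      ∧ (pvScan t i = none → ∀ k, i ≤ k → ¬ pvM ls k) := by
  intro t
  induction t with
  | nil =>
    intro i hdrop
    refine ⟨fun j hj => by simp [pvScan] at hj, fun _ k hk => ?_⟩
    intro hM
    have : ls.length ≤ i := by
      by_contra hc
      rw [List.drop_eq_nil_iff] at hdrop
      omega
    have := (List.getElem?_eq_some_iff.1 hM.1).1
    omega
  | cons c rest ih =>
    intro i hdrop
    have hi : i < ls.length := by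
      by_contra hc
      rw [List.drop_eq_nil_of_le (by omega)] at hdrop
      exact absurd hdrop (by simp)
    have hgc : ls[i] = c := by
      have := congrArg List.head? hdrop
      rw [List.drop_eq_getElem_cons hi] at this
      exact Option.some.inj this
    have hrest : ls.drop (i + 1) = rest := by
      have := congrArg List.tail hdrop
      rw [List.drop_eq_getElem_cons hi] at this
      simpa using this
    have hcond : (c == ' ' && pvKeywords.any fun kw => PySem.Chars.startswith rest kw) = true
        ↔ pvM ls i := by
      unfold pvM
      rw [Bool.and_eq_true, beq_iff_eq, List.any_eq_true]
      constructor
      · rintro ⟨h1, kw, hkw, h2⟩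
        exact ⟨by rw [List.getElem?_eq_getElem hi, hgc, h1], kw, hkw,
          by rw [hrest]; exact (PySem.Chars.startswith_iff rest kw).1 h2⟩
      · rintro ⟨h1, kw, hkw, h2⟩
        rw [List.getElem?_eq_getElem hi, hgc] at h1
        exact ⟨Option.some.inj h1, kw, hkw,
          (PySem.Chars.startswith_iff rest kw).2 (by rwa [hrest] at h2)⟩
    constructor
    · intro j hj
      simp only [pvScan] at hj
      by_cases hb : (c == ' ' && pvKeywords.any fun kw => PySem.Chars.startswith rest kw) = true
      · rw [if_pos hb] at hj
        have hji : j = i := (Option.some.inj hj).symm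
        subst hji
        exact ⟨le_refl _, hcond.1 hb, fun k h1 h2 => absurd (le_antisymm (by omega) h1) (by omega)⟩
      · rw [if_neg hb] at hj
        obtain ⟨h1, h2, h3⟩ := (ih (i + 1) (by rw [hrest])).1 j hj
        refine ⟨by omega, h2, fun k hk1 hk2 => ?_⟩
        rcases eq_or_lt_of_le hk1 with rfl | hlt
        · exact fun hM => hb (hcond.2 hM)
        · exact h3 k hlt hk2
    · intro hn k hk1
      simp only [pvScan] at hn
      by_cases hb : (c == ' ' && pvKeywords.any fun kw => PySem.Chars.startswith rest kw) = true
      · rw [if_pos hb] at hn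
        exact absurd hn (by simp)
      · rw [if_neg hb] at hn
        rcases eq_or_lt_of_le hk1 with rfl | hlt
        · exact fun hM => hb (hcond.2 hM)
        · exact (ih (i + 1) (by rw [hrest])).2 hn k hlt

lemma pv_split0_good (s : List Char) : pvGoodW (PySem.Chars.split₀ s) := by
  suffices h : ∀ (t cur : List Char) (acc : List (List Char)),
      (∀ c ∈ cur, PySem.Chars.isspace c = false) →
      (∀ w ∈ acc, w ≠ [] ∧ ∀ c ∈ w, PySem.Chars.isspace c = false) →
      ∀ w ∈ PySem.Chars.split₀.go t cur acc, w ≠ [] ∧ ∀ c ∈ w, PySem.Chars.isspace c = false by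
    exact h s [] [] (by simp) (by simp)
  intro t
  induction t with
  | nil =>
    intro cur acc hcur hacc w hw
    simp only [PySem.Chars.split₀.go] at hw
    split_ifs at hw with he
    · exact hacc w (List.mem_reverse.1 hw)
    · rcases List.mem_cons.1 (List.mem_reverse.1 hw) with rfl | hw'
      · have hcne : cur ≠ [] := by simpa [List.isEmpty_iff] using he
        refine ⟨by simpa using hcne, ?_⟩
        intro c hc
        exact hcur c (List.mem_reverse.1 hc)
      · exact hacc w hw'
  | cons c rest ih =>
    intro cur acc hcur hacc w hw
    simp only [PySem.Chars.split₀.go] at hw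
    split_ifs at hw with h1 h2
    · exact ih [] acc (by simp) hacc w hw
    · refine ih [] (cur.reverse :: acc) (by simp) ?_ w hw
      intro w' hw'
      rcases List.mem_cons.1 hw' with rfl | hmem
      · have hcne : cur ≠ [] := by simpa [List.isEmpty_iff] using h2
        refine ⟨by simpa using hcne, ?_⟩
        intro c' hc'
        exact hcur c' (List.mem_reverse.1 hc')
      · exact hacc w' hmem
    · refine ih (c :: cur) acc ?_ hacc w hw
      intro c' hc'
      rcases List.mem_cons.1 hc' with rfl | hmem
      · simpa using h1
      · exact hcur c' hmem

lemma pv_join_single (w : List Char) : List.intercalate [' '] [w] = w := by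
  simp [List.intercalate]

lemma pv_join_cons (w x : List Char) (xs : List (List Char)) :
    List.intercalate [' '] (w :: x :: xs) = w ++ ' ' :: List.intercalate [' '] (x :: xs) := by
  simp [List.intercalate]

lemma pv_join_ne_nil (ws : List (List Char)) (hg : pvGoodW ws) (h : ws ≠ []) :
    List.intercalate [' '] ws ≠ [] := by
  cases ws with
  | nil => exact absurd rfl h
  | cons w ws' =>
    cases ws' with
    | nil =>
      rw [pv_join_single]
      exact (hg w (List.mem_cons_self)).1
    | cons x xs =>
      rw [pv_join_cons]
      simp

lemma pv_join_head (ws : List (List Char)) (hg : pvGoodW ws) :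
    ∀ c, (List.intercalate [' '] ws).head? = some c → PySem.Chars.isspace c = false := by
  cases ws with
  | nil => simp [List.intercalate]
  | cons w ws' =>
    have hw := hg w (List.mem_cons_self)
    cases ws' with
    | nil =>
      rw [pv_join_single]
      intro c hc
      exact hw.2 c (List.mem_of_mem_head? hc)
    | cons x xs =>
      rw [pv_join_cons, List.head?_append_of_ne_nil _ hw.1]
      intro c hc
      exact hw.2 c (List.mem_of_mem_head? hc)

lemma pv_join_last (ws : List (List Char)) (hg : pvGoodW ws) :
    ∀ c, (List.intercalate [' '] ws).getLast? = some c → PySem.Chars.isspace c = false := by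
  induction ws with
  | nil => simp [List.intercalate]
  | cons w ws' ih =>
    have hw := hg w (List.mem_cons_self)
    have hg' : pvGoodW ws' := fun v hv => hg v (List.mem_cons_of_mem _ hv)
    cases ws' with
    | nil =>
      rw [pv_join_single]
      intro c hc
      exact hw.2 c (List.mem_of_getLast? hc)
    | cons x xs =>
      have ht : List.intercalate [' '] (x :: xs) ≠ [] := pv_join_ne_nil _ hg' (by simp)
      rw [pv_join_cons, List.getLast?_append_of_ne_nil _ (by simp),
        show ' ' :: List.intercalate [' '] (x :: xs) = [' '] ++ List.intercalate [' '] (x :: xs)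
          from rfl,
        List.getLast?_append_of_ne_nil _ ht]
      exact ih hg'

lemma pv_join_space (ws : List (List Char)) (hg : pvGoodW ws) :
    ∀ i, (List.intercalate [' '] ws)[i]? = some ' ' →
      1 ≤ i ∧ ∃ c, (List.intercalate [' '] ws)[i-1]? = some c ∧ PySem.Chars.isspace c = false := by
  induction ws with
  | nil => simp [List.intercalate]
  | cons w ws' ih =>
    have hw := hg w (List.mem_cons_self)
    have hg' : pvGoodW ws' := fun v hv => hg v (List.mem_cons_of_mem _ hv)
    have hsp : PySem.Chars.isspace ' ' = true := by decide
    cases ws' with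
    | nil =>
      rw [pv_join_single]
      intro i hi
      exact absurd (hw.2 ' ' (List.mem_of_getElem? hi)) (by simp [hsp])
    | cons x xs =>
      rw [pv_join_cons]
      intro i hi
      have hwl : 1 ≤ w.length := List.length_pos_iff.mpr hw.1
      rcases lt_trichotomy i w.length with hlt | heq | hgt
      · rw [List.getElem?_append_left hlt] at hi
        exact absurd (hw.2 ' ' (List.mem_of_getElem? hi)) (by simp [hsp])
      · subst heq
        refine ⟨by omega, w[w.length - 1], ?_, hw.2 _ (List.getElem_mem _)⟩
        rw [List.getElem?_append_left (by omega), List.getElem?_eq_getElem (by omega)]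
      · have h1 : (' ' :: List.intercalate [' '] (x :: xs))[i - w.length]? = some ' ' := by
          rw [← List.getElem?_append_right (l₁ := w) (by omega)]
          exact hi
        have h2 : 1 ≤ i - w.length := by omega
        have h3 : (List.intercalate [' '] (x :: xs))[i - w.length - 1]? = some ' ' := by
          obtain ⟨k, hk⟩ : ∃ k, i - w.length = k + 1 := ⟨i - w.length - 1, by omega⟩
          rw [hk, List.getElem?_cons_succ] at h1
          rw [show i - w.length - 1 = k from by omega]
          exact h1
        obtain ⟨h4, c, h5, h6⟩ := ih hg' _ h3
        refine ⟨by omega, c, ?_, h6⟩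
        rw [List.getElem?_append_right (by omega : w.length ≤ i - 1),
          show i - 1 - w.length = (i - w.length - 1 - 1) + 1 from by omega,
          List.getElem?_cons_succ]
        exact h5

lemma pv_lstrip_id (s : List Char) (h : ∀ c, s.head? = some c → PySem.Chars.isspace c = false) :
    PySem.Chars.lstrip s = s := by
  cases s with
  | nil => rfl
  | cons c t =>
    have := h c rfl
    simp [PySem.Chars.lstrip, this]

lemma pv_rstrip_id (s : List Char) (h : ∀ c, s.getLast? = some c → PySem.Chars.isspace c = false) :
    PySem.Chars.rstrip s = s := by
  unfold PySem.Chars.rstrip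
  rw [show List.dropWhile PySem.Chars.isspace s.reverse = s.reverse from ?_, List.reverse_reverse]
  cases hs : s.reverse with
  | nil => rfl
  | cons c t =>
    have hc : s.getLast? = some c := by
      rw [← List.head?_reverse, hs]; rfl
    simp [h c hc]

lemma pv_lower_space (c : Char) (h : PySem.Chars.lowerChar c = ' ') : c = ' ' := by
  unfold PySem.Chars.lowerChar at h
  split_ifs at h with hu
  · exfalso
    have hu' : 65 ≤ c.toNat ∧ c.toNat ≤ 90 := by
      simp only [PySem.Chars.isupper, Bool.and_eq_true, decide_eq_true_eq] at hu
      exact hu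
    have hv : (c.toNat + 32).isValidChar := Or.inl (by omega)
    have h2 := congrArg Char.toNat h
    rw [show Char.ofNat (c.toNat + 32) = Char.ofNatAux (c.toNat + 32) hv from dif_pos hv,
      Char.toNat_ofNatAux hv] at h2
    have h3 : (' ').toNat = 32 := rfl
    omega
  · exact h

-- ===== VERDICT (by name: the statement is the Claim_ definition above) =====
lemma pv_keywords_nospace : ∀ kw ∈ pvKeywords, ∀ c ∈ kw, c ≠ ' ' := by
  intro kw hkw c hc
  fin_cases hkw <;> fin_cases hc <;> decide

theorem simplify_tool_name_py_spec : Claim_equal_simplify_tool_name_py := by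
  intro tool _
  unfold Spec_simplify_tool_name_py simplify_tool_name_py simplify_tool_name_py_alt
  have hg : pvGoodW (PySem.Chars.split₀ tool.toList) := pv_split0_good _
  set ws := PySem.Chars.split₀ tool.toList with hws
  set s : List Char := List.intercalate [' '] ws with hs
  have hjoin : (PySem.Str.join " " (PySem.Str.split₀ tool)).toList = s := by
    simp [PySem.Str.join, PySem.Str.split₀, PySem.Chars.join, List.map_map, Function.comp_def,
      String.toList_ofList, hs, hws]
  have hstrip : PySem.Chars.strip s = s := by
    unfold PySem.Chars.strip
    rw [pv_lstrip_id s (pv_join_head ws hg), pv_rstrip_id s (pv_join_last ws hg)]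
  have hnameA : (PySem.Str.strip (PySem.Str.join " " (PySem.Str.split₀ tool))).toList = s := by
    rw [PySem.Str.toList_strip, hjoin, hstrip]
  by_cases hempty : s = []
  · have hA : PySem.Str.strip (PySem.Str.join " " (PySem.Str.split₀ tool)) = "" :=
      String.toList_inj.mp (by rw [hnameA, hempty]; simp)
    have hB : PySem.Str.join " " (PySem.Str.split₀ tool) = "" :=
      String.toList_inj.mp (by rw [hjoin, hempty]; simp)
    rw [if_pos hA, if_pos hB]
  · have hAne : PySem.Str.strip (PySem.Str.join " " (PySem.Str.split₀ tool)) ≠ "" := by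
      intro hcon
      exact hempty (by rw [← hnameA, hcon]; simp)
    have hBne : PySem.Str.join " " (PySem.Str.split₀ tool) ≠ "" := by
      intro hcon
      exact hempty (by rw [← hjoin, hcon]; simp)
    rw [if_neg hAne, if_neg hBne]
    rw [hnameA, hjoin]
    set ls := PySem.Chars.lower s with hls
    have hlen : ls.length = s.length := by
      rw [hls]
      simp [PySem.Chars.lower]
    have hkeys : ∀ kw ∈ pvKeywords, ∀ c ∈ kw, c ≠ ' ' := pv_keywords_nospace
    obtain ⟨hfold, hgoodL⟩ := pv_loop_eq ls s pvKeywords ls.length hkeys (Or.inl rfl)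
    have hinit : (s, ls) = (s.take ls.length, ls.take ls.length) := by
      rw [hlen, List.take_length, ← hlen, List.take_length]
    rw [show (List.foldl pvAStep (s, ls) pvKeywords)
        = List.foldl pvAStep (s.take ls.length, ls.take ls.length) pvKeywords
      from by rw [← hinit], hfold]
    set LF := pvLF ls pvKeywords ls.length with hLF
    cases hscan : pvScan ls 0 with
    | none =>
      have hnoM : ∀ k, ¬ pvM ls k :=
        fun k => (pv_scan_aux ls ls 0 (by simp)).2 hscan k (Nat.zero_le k)
      have hLFeq : LF = ls.length := by
        have hle := pv_lf_le ls pvKeywords ls.length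
        by_contra hne
        obtain ⟨kw, hm, ho⟩ := pv_lf_attained ls pvKeywords ls.length (by omega)
        exact hnoM LF ((pv_M_iff ls LF).2 ⟨kw, hm, ho⟩)
      rw [hLFeq]
      simp only [show List.take ls.length s = s from by rw [hlen, List.take_length], hstrip]
      exact String.toList_inj.mp (by rw [String.toList_ofList, hjoin])
    | some i0 =>
      obtain ⟨-, hM, hmin⟩ := (pv_scan_aux ls ls 0 (by simp)).1 i0 hscan
      have hi0 : i0 < ls.length := (List.getElem?_eq_some_iff.1 hM.1).1
      have hLFeq : LF = i0 := by
        have hle1 : LF ≤ i0 := by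
          by_contra hc
          obtain ⟨kw, hkw, hocc⟩ := (pv_M_iff ls i0).1 hM
          exact pv_lf_lower ls pvKeywords ls.length kw hkw i0 (by omega) hocc
        rcases eq_or_lt_of_le hle1 with h | h
        · exact h
        · exfalso
          obtain ⟨kw, hm, ho⟩ := pv_lf_attained ls pvKeywords ls.length (by omega)
          exact hmin LF (Nat.zero_le _) h ((pv_M_iff ls LF).2 ⟨kw, hm, ho⟩)
      rw [hLFeq]
      have hssp : s[i0]? = some ' ' := by
        have hM1 := hM.1
        rw [hls] at hM1
        simp only [PySem.Chars.lower, List.getElem?_map] at hM1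
        cases hsi : s[i0]? with
        | none => rw [hsi] at hM1; simp at hM1
        | some c =>
          rw [hsi] at hM1
          simp only [Option.map_some, Option.some.injEq] at hM1
          rw [pv_lower_space c hM1]
      obtain ⟨h1le, c1, hc1, hc1ns⟩ := pv_join_space ws hg i0 (by rw [← hs]; exact hssp)
      have hstrip2 : PySem.Chars.strip (s.take i0) = s.take i0 := by
        unfold PySem.Chars.strip
        have hh : ∀ c, (s.take i0).head? = some c → PySem.Chars.isspace c = false := by
          intro c hc
          have : (s.take i0).head? = s.head? := by
            cases s with
            | nil => simp
            | cons a t =>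
              cases hi : i0 with
              | zero => omega
              | succ k => simp
          rw [this] at hc
          exact pv_join_head ws hg c hc
        have hl : ∀ c, (PySem.Chars.lstrip (s.take i0)).getLast? = some c →
            PySem.Chars.isspace c = false := by
          rw [pv_lstrip_id _ hh]
          intro c hc
          have hlen2 : (s.take i0).length = i0 := by
            rw [List.length_take]
            omega
          rw [List.getLast?_eq_getElem?, hlen2, List.getElem?_take_of_lt (by omega)] at hc
          rw [← hs] at hc1
          rw [hc1] at hc
          rw [show c = c1 from (Option.some.inj hc).symm]
          exact hc1ns
        rw [pv_lstrip_id _ hh, pv_rstrip_id _ (by rw [← pv_lstrip_id _ hh]; exact hl)]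
      simp only [hstrip2]
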